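-- pv_equiv track=rewrite | github.com/thisisiron/Algorithm | Programmers/Summer_Winter/2020/q3.py | solution
-- ===== SOURCE A (Python) =====
-- from collections import deque
--
-- UP = [-1, 0]
--
-- DOWN = [1, 0]
--
-- LEFT = [0, -1]
--
-- RIGHT = [0, 1]
--
-- def bfs(land, visited, group, y, x):
--     queue: deque = deque()
--     queue.append([y, x])
--     visited[y][x] = group
--
--     while queue:
--         y, x = queue.popleft()
--
--         for move_y, move_x in [UP, DOWN, LEFT, RIGHT]:
--             if y + move_y >= 0 and y + move_y < len(land) and x + move_x >= 0 and x + move_x < len(land[0]) and \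
--             abs(land[y][x] - land[y + move_y][x + move_x]) == 0:
--                 if visited[y + move_y][x + move_x] == 0:
--                     visited[y + move_y][x + move_x] = group
--                     queue.append([y + move_y, x + move_x])
--
-- def solution(v):
--     visited = [[0] * len(v[0]) for _ in range(len(v))]
--
--     group = 1
--     for i in range(len(v)):
--         for j in range(len(v[0])):
--             if visited[i][j] == 0:
--                 bfs(v, visited, group, i, j)
--                 group += 1
--
--     res = {i: set() for i in range(3)}
--     for i in range(len(v)):
--         for j in range(len(v[0])):
--             res[v[i][j]].add(visited[i][j])
--     return [len(res[i]) for i in range(3)]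
-- ===== SOURCE B (Python) =====
-- def solution(v):
--     rows = len(v)
--     cols = len(v[0])
--     n = rows * cols
--     parent = list(range(n))
--
--     def find(i):
--         while parent[i] != i:
--             i = parent[i]
--         return i
--
--     def union(a, b):
--         ra = find(a)
--         rb = find(b)
--         if ra != rb:
--             if ra < rb:
--                 parent[rb] = ra
--             else:
--                 parent[ra] = rb
--
--     for i in range(rows):
--         for j in range(cols):
--             if j + 1 < cols and v[i][j] == v[i][j + 1]:
--                 union(i * cols + j, i * cols + j + 1)
--             if i + 1 < rows and v[i][j] == v[i + 1][j]:
--                 union(i * cols + j, (i + 1) * cols + j)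
--
--     roots = [set(), set(), set()]
--     for i in range(rows):
--         for j in range(cols):
--             roots[v[i][j]].add(find(i * cols + j))
--     return [len(s) for s in roots]
-- ===== Notes on version B (the rewrite author's own statement) =====
-- stated objective: alternative
-- what changed: Replaces the row-major scan + BFS flood fill (deque, integer group labels, dict of label-sets) by a union-find over flattened cell indices (union each cell with its equal-valued right and down neighbour, then count distinct roots per land value); Pre_ excludes only v = [], where A happens to return [0,0,0] (the comprehension never evaluates len(v[0])) while B's natural len(v[0]) raises IndexError.
-- outside the precondition, e.g. on solution([]): A returns [0, 0, 0], B raises IndexError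
import Mathlib
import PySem

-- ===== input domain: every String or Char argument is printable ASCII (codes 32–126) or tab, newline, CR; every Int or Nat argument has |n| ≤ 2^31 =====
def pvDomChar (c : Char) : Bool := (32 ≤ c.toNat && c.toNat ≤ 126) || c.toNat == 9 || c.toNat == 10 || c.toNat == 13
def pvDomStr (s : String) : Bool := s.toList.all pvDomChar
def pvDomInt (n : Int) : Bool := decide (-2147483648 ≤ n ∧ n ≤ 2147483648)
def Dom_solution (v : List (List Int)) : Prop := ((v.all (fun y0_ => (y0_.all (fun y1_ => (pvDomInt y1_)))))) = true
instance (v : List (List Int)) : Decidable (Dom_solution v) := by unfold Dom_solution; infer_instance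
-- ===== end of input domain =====

-- B replaces A's scan+BFS flood fill (deque, group labels, dict of label-sets) by a union-find over
-- flattened cell indices (union equal-valued right/down neighbours, count distinct roots per value);
-- same cost class, genuinely different algorithm ("alternative").

-- ===== PORT A =====
-- matrix access m[y][x] / m[y][x] = a: every use below is guarded so that 0 ≤ y,x and they are in
-- range (Pre_ ensures rows are long enough), where this equals Python's indexing exactly.
def mgetI (m : List (List Int)) (y x : Int) : Int := (m.getD y.toNat []).getD x.toNat 0

def msetI (m : List (List Int)) (y x : Int) (a : Int) : List (List Int) :=
  m.set y.toNat ((m.getD y.toNat []).set x.toNat a)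

-- [UP, DOWN, LEFT, RIGHT]
def pvMoves : List (Int × Int) := [(-1, 0), (1, 0), (0, -1), (0, 1)]

-- body of bfs's `for move_y, move_x in [UP, DOWN, LEFT, RIGHT]` loop; state = (visited, queue)
def bfsMove (land : List (List Int)) (group y x : Int)
    (s : List (List Int) × List (Int × Int)) (mv : Int × Int) :
    List (List Int) × List (Int × Int) :=
  if 0 ≤ y + mv.1 ∧ y + mv.1 < (land.length : Int) ∧ 0 ≤ x + mv.2 ∧ x + mv.2 < ((land.headD []).length : Int) ∧
      |mgetI land y x - mgetI land (y + mv.1) (x + mv.2)| = 0 then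
    if mgetI s.1 (y + mv.1) (x + mv.2) = 0 then
      (msetI s.1 (y + mv.1) (x + mv.2) group, s.2 ++ [(y + mv.1, x + mv.2)])
    else s
  else s

-- bfs's `while queue` loop; the fuel only makes the recursion structural — it is proved below
-- (bfsLoop_measure) never to run out on the states bfs reaches under Pre_.
def bfsLoop (land : List (List Int)) (group : Int) :
    Nat → List (List Int) → List (Int × Int) → List (List Int)
  | 0, vis, _ => vis
  | _ + 1, vis, [] => vis
  | f + 1, vis, (y, x) :: rest =>
    let s := pvMoves.foldl (bfsMove land group y x) (vis, rest)
    bfsLoop land group f s.1 s.2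

def bfsA (land vis : List (List Int)) (group y x : Int) : List (List Int) :=
  bfsLoop land group (2 * land.length * (land.headD []).length + 1) (msetI vis y x group) [(y, x)]

def solution (v : List (List Int)) : List Int :=
  let rows : Int := v.length
  let cols : Int := (v.headD []).length
  -- visited = [[0] * len(v[0]) for _ in range(len(v))]
  let init : List (List Int) := (PySem.List.pyRange 0 rows 1).map (fun _ => List.replicate cols.toNat 0)
  let sg := (PySem.List.pyRange 0 rows 1).foldl (fun sg i =>
      (PySem.List.pyRange 0 cols 1).foldl (fun (sg : List (List Int) × Int) j =>
        if mgetI sg.1 i j = 0 then (bfsA v sg.1 sg.2 i j, sg.2 + 1) else sg) sg) (init, 1)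
  -- res = {i: set() for i in range(3)}
  let res0 : PySem.Dict Int (PySem.Set Int) :=
    (PySem.List.pyRange 0 3 1).foldl (fun d i => d.insert i []) PySem.Dict.empty
  -- res[v[i][j]].add(visited[i][j])  (Pre_ keeps every v[i][j] among the keys 0,1,2)
  let resF := (PySem.List.pyRange 0 rows 1).foldl (fun d i =>
      (PySem.List.pyRange 0 cols 1).foldl (fun (d : PySem.Dict Int (PySem.Set Int)) j =>
        d.modify (mgetI v i j) [] (fun s => s.add (mgetI sg.1 i j))) d) res0
  (PySem.List.pyRange 0 3 1).map (fun i => PySem.Set.len (resF.getD i []))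

-- ===== PORT B =====
-- find(i): follow parents until a fixed point; fuel i+1 suffices since parent[k] ≤ k throughout
def findRoot (parent : List Int) : Nat → Int → Int
  | 0, i => i
  | f + 1, i => if parent.getD i.toNat 0 = i then i else findRoot parent f (parent.getD i.toNat 0)

def ufFind (parent : List Int) (i : Int) : Int := findRoot parent (i.toNat + 1) i

def ufUnion (parent : List Int) (a b : Int) : List Int :=
  let ra := ufFind parent a
  let rb := ufFind parent b
  if ra = rb then parent
  else if ra < rb then parent.set rb.toNat ra
  else parent.set ra.toNat rb

-- Python list index for the 3-element roots list: one negative wrap (roots[-1] is roots[2]);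
-- indices Python would raise IndexError on are outside Pre_ (values there are 0,1,2)
def pyIdx3 (t : Int) : Nat := (if t < 0 then t + 3 else t).toNat

def solution_alt (v : List (List Int)) : List Int :=
  let rows : Int := v.length
  let cols : Int := (v.headD []).length
  -- parent = list(range(rows*cols))
  let parent0 := PySem.List.pyRange 0 (rows * cols) 1
  let pF := (PySem.List.pyRange 0 rows 1).foldl (fun p i =>
      (PySem.List.pyRange 0 cols 1).foldl (fun (p : List Int) j =>
        let p1 := if j + 1 < cols ∧ mgetI v i j = mgetI v i (j + 1) then
            ufUnion p (i * cols + j) (i * cols + j + 1) else p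
        if i + 1 < rows ∧ mgetI v i j = mgetI v (i + 1) j then
          ufUnion p1 (i * cols + j) ((i + 1) * cols + j) else p1) p) parent0
  -- roots = [set(), set(), set()]; roots[v[i][j]].add(find(i*cols+j))  (Pre_ keeps v[i][j] in {0,1,2})
  let roots0 : List (PySem.Set Int) := [[], [], []]
  let rootsF := (PySem.List.pyRange 0 rows 1).foldl (fun rs i =>
      (PySem.List.pyRange 0 cols 1).foldl (fun (rs : List (PySem.Set Int)) j =>
        rs.set (pyIdx3 (mgetI v i j)) ((rs.getD (pyIdx3 (mgetI v i j)) []).add (ufFind pF (i * cols + j)))) rs) roots0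
  rootsF.map (fun s => PySem.Set.len s)

-- ===== PRECONDITION & SPEC =====
-- The inputs where A returns, except v = []: every row at least as long as the first (else
-- v[i][j] raises IndexError for some j < len(v[0])) and every value in the first len(v[0])
-- columns one of 0,1,2 (else res[v[i][j]] raises KeyError).  v = [] is excluded although A
-- returns [0,0,0] there (its comprehension never evaluates len(v[0])): B's natural len(v[0])
-- raises IndexError on it.
def Pre_solution (v : List (List Int)) : Prop :=
  v ≠ [] ∧ ∀ row ∈ v, (v.headD []).length ≤ row.length ∧
    ∀ j < (v.headD []).length, row.getD j 0 = 0 ∨ row.getD j 0 = 1 ∨ row.getD j 0 = 2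

instance (v : List (List Int)) : Decidable (Pre_solution v) := by unfold Pre_solution; infer_instance

def pvWitness_solution : List (List Int) := [[0, 1], [2, 2]]

def Spec_solution (v : List (List Int)) (out : List Int) : Prop := out = solution_alt v
instance (v : List (List Int)) (out : List Int) : Decidable (Spec_solution v out) := by unfold Spec_solution; infer_instance

-- ===== CLAIM (what is proved, stated in full; the proofs are below) =====
def Claim_equal_solution : Prop := ∀ (v : List (List Int)), Dom_solution v → Pre_solution v → Spec_solution v (solution v)

-- ===== LEMMAS AND PROOFS =====

-- ---------- basic notation ----------
def pvRows (v : List (List Int)) : Int := (v.length : Int)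
def pvCols (v : List (List Int)) : Int := ((v.headD []).length : Int)
def pvLab (m : List (List Int)) (p : Int × Int) : Int := mgetI m p.1 p.2

def GridP (v : List (List Int)) (p : Int × Int) : Prop :=
  0 ≤ p.1 ∧ p.1 < pvRows v ∧ 0 ≤ p.2 ∧ p.2 < pvCols v

def AdjP (v : List (List Int)) (p q : Int × Int) : Prop :=
  GridP v p ∧ GridP v q ∧ pvLab v p = pvLab v q ∧
    ((p.1 = q.1 ∧ (q.2 = p.2 + 1 ∨ p.2 = q.2 + 1)) ∨ (p.2 = q.2 ∧ (q.1 = p.1 + 1 ∨ p.1 = q.1 + 1)))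

def ReachP (v : List (List Int)) : Int × Int → Int × Int → Prop := Relation.ReflTransGen (AdjP v)

theorem adjP_symm (v : List (List Int)) : Symmetric (AdjP v) := by
  rintro p q ⟨hp, hq, hv, hd⟩
  exact ⟨hq, hp, hv.symm, by tauto⟩

theorem reachP_symm (v : List (List Int)) {p q : Int × Int} (h : ReachP v p q) : ReachP v q p :=
  Relation.ReflTransGen.symmetric (adjP_symm v) h

-- ---------- matrix get/set ----------
def WFm (v m : List (List Int)) : Prop :=
  m.length = v.length ∧ ∀ row ∈ m, row.length = (v.headD []).length

theorem getD_set_self' {α : Type} (l : List α) (i : Nat) (a d : α) (h : i < l.length) :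
    (l.set i a).getD i d = a := by
  rw [List.getD_eq_getElem?_getD, List.getElem?_set_self h]; rfl

theorem getD_set_ne' {α : Type} (l : List α) {i j : Nat} (a d : α) (h : i ≠ j) :
    (l.set i a).getD j d = l.getD j d := by
  rw [List.getD_eq_getElem?_getD, List.getElem?_set_ne h, ← List.getD_eq_getElem?_getD]

theorem mget_mset_self {m : List (List Int)} {y x : Int} (a : Int)
    (hy : y.toNat < m.length) (hx : x.toNat < (m.getD y.toNat []).length) :
    mgetI (msetI m y x a) y x = a := by
  unfold mgetI msetI
  rw [getD_set_self' _ _ _ _ hy, getD_set_self' _ _ _ _ hx]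

theorem mget_mset_ne {m : List (List Int)} {y x y' x' : Int} (a : Int)
    (h : y.toNat ≠ y'.toNat ∨ x.toNat ≠ x'.toNat) :
    mgetI (msetI m y x a) y' x' = mgetI m y' x' := by
  unfold mgetI msetI
  rcases h with h | h
  · rw [getD_set_ne' _ _ _ h]
  · by_cases hy : y.toNat = y'.toNat
    · by_cases hlt : y.toNat < m.length
      · rw [← hy, getD_set_self' _ _ _ _ hlt, getD_set_ne' _ _ _ h]
      · rw [List.set_eq_of_length_le (le_of_not_gt hlt)]
    · rw [getD_set_ne' _ _ _ hy]

theorem getD_mem' {α : Type} {l : List α} {i : Nat} (d : α) (h : i < l.length) :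
    l.getD i d ∈ l := by
  rw [List.getD_eq_getElem?_getD, List.getElem?_eq_getElem h]
  exact List.getElem_mem h

theorem wfm_mset {v m : List (List Int)} {y x : Int} (a : Int) (h : WFm v m)
    (hy : y.toNat < m.length) : WFm v (msetI m y x a) := by
  obtain ⟨hlen, hrow⟩ := h
  refine ⟨by simpa [msetI] using hlen, ?_⟩
  intro row hr
  rcases List.mem_or_eq_of_mem_set hr with hr | hr
  · exact hrow row hr
  · subst hr
    rw [List.length_set]
    exact hrow _ (getD_mem' _ hy)

-- in-range reads of a well-formed matrix are real reads
theorem wfm_row_len {v m : List (List Int)} (h : WFm v m) {y : Int}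
    (hy : 0 ≤ y) (hy2 : y < pvRows v) : (m.getD y.toNat []).length = (v.headD []).length := by
  have : y.toNat < m.length := by
    rw [h.1]; unfold pvRows at hy2; omega
  exact h.2 _ (getD_mem' _ this)

-- ---------- the cell list (row-major) ----------
def cellsOf (v : List (List Int)) : List (Int × Int) :=
  (PySem.List.pyRange 0 (pvRows v) 1) ×ˢ (PySem.List.pyRange 0 (pvCols v) 1)

theorem mem_cellsOf {v : List (List Int)} {p : Int × Int} : p ∈ cellsOf v ↔ GridP v p := by
  obtain ⟨a, b⟩ := p
  simp [cellsOf, List.mem_product, PySem.List.mem_pyRange_one, GridP]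
  tauto

theorem nodup_cellsOf (v : List (List Int)) : (cellsOf v).Nodup :=
  List.Nodup.product (PySem.List.nodup_pyRange_one _ _) (PySem.List.nodup_pyRange_one _ _)

theorem length_cellsOf (v : List (List Int)) :
    (cellsOf v).length = v.length * (v.headD []).length := by
  simp [cellsOf, List.length_product, PySem.List.length_pyRange_one, pvRows, pvCols]

-- a nested row/column fold is the fold over the row-major cell list
theorem foldl_cells {α : Type} (v : List (List Int)) (f : α → Int × Int → α) (init : α) :
    (PySem.List.pyRange 0 (pvRows v) 1).foldl (fun a i =>
      (PySem.List.pyRange 0 (pvCols v) 1).foldl (fun a j => f a (i, j)) a) init =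
    (cellsOf v).foldl f init := by
  have hp : (PySem.List.pyRange 0 (pvRows v) 1) ×ˢ (PySem.List.pyRange 0 (pvCols v) 1)
      = (PySem.List.pyRange 0 (pvRows v) 1).flatMap
          (fun a => (PySem.List.pyRange 0 (pvCols v) 1).map (a, ·)) := rfl
  rw [cellsOf, hp, List.foldl_flatMap]
  simp [List.foldl_map]

-- ---------- counting distinct values of equivalence-compatible functions ----------
theorem set_update_length {α : Type} (l : List α) (f g : α → Int)
    (hiff : ∀ a ∈ l, ∀ b ∈ l, (f a = f b ↔ g a = g b)) :
    (PySem.Set.ofList (l.map f)).length = (PySem.Set.ofList (l.map g)).length := by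
  have main : ∀ (l' : List α) (s t : PySem.Set Int),
      (∀ a ∈ l', (f a ∈ s ↔ g a ∈ t)) →
      (∀ a ∈ l', ∀ b ∈ l', (f a = f b ↔ g a = g b)) →
      s.length = t.length →
      (PySem.Set.update s (l'.map f)).length = (PySem.Set.update t (l'.map g)).length := by
    intro l'
    induction l' with
    | nil => intro s t _ _ h; simpa [PySem.Set.update] using h
    | cons a l' ih =>
      intro s t hmem hiff' hlen
      simp only [List.map_cons, PySem.Set.update, List.foldl_cons]
      have hstep : (PySem.Set.add s (f a)).length = (PySem.Set.add t (g a)).length ∧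
          (∀ b ∈ l', (f b ∈ PySem.Set.add s (f a) ↔ g b ∈ PySem.Set.add t (g a))) := by
        constructor
        · by_cases hin : f a ∈ s
          · rw [PySem.Set.add_of_mem hin, PySem.Set.add_of_mem ((hmem a (by simp)).mp hin)]
            exact hlen
          · have hgt : g a ∉ t := fun hg => hin ((hmem a (by simp)).mpr hg)
            rw [PySem.Set.add_of_not_mem hin, PySem.Set.add_of_not_mem hgt]
            simp [hlen]
        · intro b hb
          rw [PySem.Set.mem_add, PySem.Set.mem_add]
          constructor
          · rintro (h | h)
            · exact Or.inl ((hmem b (by simp [hb])).mp h)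
            · exact Or.inr ((hiff' b (by simp [hb]) a (by simp)).mp h)
          · rintro (h | h)
            · exact Or.inl ((hmem b (by simp [hb])).mpr h)
            · exact Or.inr ((hiff' b (by simp [hb]) a (by simp)).mpr h)
      exact ih _ _ hstep.2 (fun x hx y hy => hiff' x (by simp [hx]) y (by simp [hy])) hstep.1
  have h0 : ∀ ll ff, PySem.Set.ofList (List.map ff ll) = PySem.Set.update ([] : PySem.Set Int) (List.map (ff : α → Int) ll) := by
    intro ll ff; rw [PySem.Set.ofList_eq_foldl]; rfl
  rw [h0 l f, h0 l g]
  exact main l [] [] (by simp) hiff rfl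



-- ---------- grid reads/writes ----------
theorem grid_row_lt {v m : List (List Int)} (hwf : WFm v m) {p : Int × Int} (hp : GridP v p) :
    p.1.toNat < m.length := by
  obtain ⟨h1, h2, _, _⟩ := hp; rw [hwf.1]; unfold pvRows at h2; omega

theorem grid_col_lt {v m : List (List Int)} (hwf : WFm v m) {p : Int × Int} (hp : GridP v p) :
    p.2.toNat < (m.getD p.1.toNat []).length := by
  obtain ⟨h1, h2, h3, h4⟩ := hp
  rw [wfm_row_len hwf h1 h2]; unfold pvCols at h4; omega

theorem lab_mset_self {v m : List (List Int)} {c : Int × Int} (a : Int) (hwf : WFm v m)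
    (hc : GridP v c) : pvLab (msetI m c.1 c.2 a) c = a :=
  mget_mset_self a (grid_row_lt hwf hc) (grid_col_lt hwf hc)

theorem lab_mset_ne {v m : List (List Int)} {c p : Int × Int} (a : Int)
    (hc : GridP v c) (hp : GridP v p) (hne : p ≠ c) :
    pvLab (msetI m c.1 c.2 a) p = pvLab m p := by
  apply mget_mset_ne
  obtain ⟨h1, h2, h3, h4⟩ := hp; obtain ⟨g1, g2, g3, g4⟩ := hc
  have : p.1 ≠ c.1 ∨ p.2 ≠ c.2 := by
    rcases Classical.em (p.1 = c.1) with h | h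
    · exact Or.inr (fun h2 => hne (Prod.ext h h2))
    · exact Or.inl h
  omega

-- ---------- the zero-cell measure ----------
def ZC (v m : List (List Int)) : Nat := (cellsOf v).countP (fun p => pvLab m p == 0)

theorem zc_le (v m : List (List Int)) : ZC v m ≤ (cellsOf v).length := List.countP_le_length

theorem zc_mset {v m : List (List Int)} {c : Int × Int} (g : Int) (hwf : WFm v m)
    (hc : GridP v c) (h0 : pvLab m c = 0) (hg : g ≠ 0) :
    ZC v (msetI m c.1 c.2 g) + 1 = ZC v m := by
  obtain ⟨l₁, l₂, hsplit⟩ := List.append_of_mem (mem_cellsOf.mpr hc)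
  have hnd := nodup_cellsOf v
  rw [hsplit] at hnd
  have hc1 : c ∉ l₁ := fun h => (List.nodup_append.mp hnd).2.2 c h c (by simp) rfl
  have hc2 : c ∉ l₂ := by
    have := (List.nodup_append.mp hnd).2.1
    exact (List.nodup_cons.mp this).1
  have hgrid : ∀ q ∈ l₁ ++ l₂, GridP v q := by
    intro q hq
    apply mem_cellsOf.mp
    rw [hsplit]
    rcases List.mem_append.mp hq with h | h
    · exact List.mem_append.mpr (Or.inl h)
    · exact List.mem_append.mpr (Or.inr (by simp [h]))
  have hpres : ∀ q ∈ l₁ ++ l₂, pvLab (msetI m c.1 c.2 g) q = pvLab m q := by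
    intro q hq
    apply lab_mset_ne g hc (hgrid q hq)
    intro h; subst h
    rcases List.mem_append.mp hq with h | h
    · exact hc1 h
    · exact hc2 h
  unfold ZC
  rw [hsplit, List.countP_append, List.countP_cons, List.countP_append, List.countP_cons]
  have e1 : List.countP (fun p => pvLab (msetI m c.1 c.2 g) p == 0) l₁ = List.countP (fun p => pvLab m p == 0) l₁ := by
    apply List.countP_congr; intro x hx
    simp [hpres x (List.mem_append.mpr (Or.inl hx))]
  have e2 : List.countP (fun p => pvLab (msetI m c.1 c.2 g) p == 0) l₂ = List.countP (fun p => pvLab m p == 0) l₂ := by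
    apply List.countP_congr; intro x hx
    simp [hpres x (List.mem_append.mpr (Or.inr hx))]
  have ec : pvLab (msetI m c.1 c.2 g) c = g := lab_mset_self g hwf hc
  rw [e1, e2]
  simp [ec, h0, hg]
  omega

-- ---------- the BFS loop invariant ----------
def JInv (v : List (List Int)) (g : Int) (s : Int × Int) (m₀ m : List (List Int))
    (q : List (Int × Int)) : Prop :=
  WFm v m ∧
  (∀ p, GridP v p → ¬ ReachP v s p → pvLab m p = pvLab m₀ p) ∧
  (∀ p, GridP v p → ReachP v s p → pvLab m p = g ∨ pvLab m p = 0) ∧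
  (∀ c ∈ q, GridP v c ∧ ReachP v s c ∧ pvLab m c = g) ∧
  (∀ p, GridP v p → pvLab m p = g → p ∉ q → ∀ r, AdjP v p r → pvLab m r = g)

theorem move_cond_iff (v : List (List Int)) {y x dy dx : Int} (hc : GridP v (y, x)) :
    (0 ≤ y + dy ∧ y + dy < (v.length : Int) ∧ 0 ≤ x + dx ∧ x + dx < ((v.headD []).length : Int) ∧
      |mgetI v y x - mgetI v (y + dy) (x + dx)| = 0) ↔
    (GridP v (y + dy, x + dx) ∧ pvLab v (y, x) = pvLab v (y + dy, x + dx)) := by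
  rw [abs_eq_zero, sub_eq_zero]
  unfold GridP pvRows pvCols pvLab
  simp only []
  tauto

theorem bfsMove_inv (v : List (List Int)) (g : Int) (s : Int × Int) (m₀ : List (List Int))
    {y x : Int} (mv : Int × Int) (st : List (List Int) × List (Int × Int))
    (hg : 1 ≤ g)
    (hc : GridP v (y, x)) (hcr : ReachP v s (y, x))
    (hJ : JInv v g s m₀ st.1 ((y, x) :: st.2))
    (hdir : ((y, x).1 = (y + mv.1, x + mv.2).1 ∧ ((y + mv.1, x + mv.2).2 = (y, x).2 + 1 ∨ (y, x).2 = (y + mv.1, x + mv.2).2 + 1)) ∨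
            ((y, x).2 = (y + mv.1, x + mv.2).2 ∧ ((y + mv.1, x + mv.2).1 = (y, x).1 + 1 ∨ (y, x).1 = (y + mv.1, x + mv.2).1 + 1))) :
    JInv v g s m₀ (bfsMove v g y x st mv).1 ((y, x) :: (bfsMove v g y x st mv).2) ∧
    (∀ p, GridP v p → pvLab st.1 p = g → pvLab (bfsMove v g y x st mv).1 p = g) ∧
    (AdjP v (y, x) (y + mv.1, x + mv.2) → pvLab (bfsMove v g y x st mv).1 (y + mv.1, x + mv.2) = g) ∧
    2 * ZC v (bfsMove v g y x st mv).1 + (bfsMove v g y x st mv).2.length ≤ 2 * ZC v st.1 + st.2.length := by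
  obtain ⟨hwf, j1, j2, j3, j4⟩ := hJ
  set n : Int × Int := (y + mv.1, x + mv.2) with hn
  unfold bfsMove
  by_cases hcond : 0 ≤ y + mv.1 ∧ y + mv.1 < (v.length : Int) ∧ 0 ≤ x + mv.2 ∧ x + mv.2 < ((v.headD []).length : Int) ∧
      |mgetI v y x - mgetI v (y + mv.1) (x + mv.2)| = 0
  · have hcond' := (move_cond_iff v hc).mp hcond
    have hgn : GridP v n := hcond'.1
    have hadj : AdjP v (y, x) n := ⟨hc, hgn, hcond'.2, hdir⟩
    have hreachn : ReachP v s n := Relation.ReflTransGen.tail hcr hadj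
    by_cases h0 : mgetI st.1 (y + mv.1) (x + mv.2) = 0
    · -- enqueue: mark n with g
      have h0' : pvLab st.1 n = 0 := h0
      simp only [if_pos hcond, if_pos h0]
      have hlabc : pvLab st.1 (y, x) = g := (j3 (y, x) (by simp)).2.2
      have hwf' : WFm v (msetI st.1 n.1 n.2 g) := wfm_mset g hwf (grid_row_lt hwf hgn)
      have hpres : ∀ p, GridP v p → p ≠ n → pvLab (msetI st.1 n.1 n.2 g) p = pvLab st.1 p :=
        fun p hp hne => lab_mset_ne g hgn hp hne
      have hlabn : pvLab (msetI st.1 n.1 n.2 g) n = g := lab_mset_self g hwf hgn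
      refine ⟨⟨hwf', ?_, ?_, ?_, ?_⟩, ?_, ?_, ?_⟩
      · intro p hp hnr
        have hne : p ≠ n := fun h => hnr (h ▸ hreachn)
        rw [hpres p hp hne]; exact j1 p hp hnr
      · intro p hp hr
        by_cases hne : p = n
        · subst hne; exact Or.inl hlabn
        · rw [hpres p hp hne]; exact j2 p hp hr
      · intro c hcq
        rcases List.mem_cons.mp hcq with hcq | hcq
        · subst hcq
          have : (y, x) ≠ n := fun h => by rw [h, h0'] at hlabc; omega
          exact ⟨hc, hcr, by rw [hpres _ hc this]; exact hlabc⟩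
        · rcases List.mem_append.mp hcq with hcq | hcq
          · obtain ⟨ha, hb, hcg⟩ := j3 c (by simp [hcq])
            have : c ≠ n := fun h => by rw [h, h0'] at hcg; omega
            exact ⟨ha, hb, by rw [hpres _ ha this]; exact hcg⟩
          · have : c = n := by simpa using hcq
            subst this; exact ⟨hgn, hreachn, hlabn⟩
      · intro p hp hpl hpq r hr
        by_cases hne : p = n
        · exact absurd (show p ∈ (y, x) :: (st.2 ++ [n]) by rw [hne]; simp) hpq
        · rw [hpres p hp hne] at hpl
          have hpq' : p ∉ (y, x) :: st.2 := by
            intro hmem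
            rcases List.mem_cons.mp hmem with h | h
            · exact hpq (by simp [h])
            · exact hpq (by simp [h])
          have := j4 p hp hpl hpq' r hr
          have hrn : r ≠ n := fun h => by rw [h, h0'] at this; omega
          rw [hpres r hr.2.1 hrn]
          exact this
      · intro p hp hpl
        have hne : p ≠ n := fun h => by rw [h, h0'] at hpl; omega
        rw [hpres p hp hne]; exact hpl
      · intro _; exact hlabn
      · have hzc : ZC v (msetI st.1 (y + mv.1) (x + mv.2) g) + 1 = ZC v st.1 :=
          zc_mset g hwf hgn h0' (by omega)
        have hlen : (st.2 ++ [(y + mv.1, x + mv.2)]).length = st.2.length + 1 := by simp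
        omega
    · -- neighbour already marked
      simp only [if_pos hcond, if_neg h0]
      refine ⟨⟨hwf, j1, j2, j3, j4⟩, fun p _ h => h, ?_, le_refl _⟩
      intro _
      rcases j2 n hgn hreachn with h | h
      · exact h
      · exact absurd h h0
  · simp only [if_neg hcond]
    refine ⟨⟨hwf, j1, j2, j3, j4⟩, fun p _ h => h, ?_, le_refl _⟩
    intro hadj
    exact absurd ((move_cond_iff v hc).mpr ⟨hadj.2.1, hadj.2.2.1⟩) hcond


theorem adj_cases {v : List (List Int)} {y x : Int} {r : Int × Int} (h : AdjP v (y, x) r) :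
    r = (y + (-1 : Int), x + (0 : Int)) ∨ r = (y + 1, x + 0) ∨ r = (y + 0, x + (-1 : Int)) ∨ r = (y + 0, x + 1) := by
  obtain ⟨r1, r2⟩ := r
  rcases h.2.2.2 with ⟨h1, h2 | h2⟩ | ⟨h1, h2 | h2⟩
  · right; right; right; simp only [Prod.mk.injEq]; omega
  · right; right; left; simp only [Prod.mk.injEq]; omega
  · right; left; simp only [Prod.mk.injEq]; omega
  · left; simp only [Prod.mk.injEq]; omega

theorem bfsPop (v : List (List Int)) (g : Int) (s : Int × Int) (m₀ : List (List Int))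
    {y x : Int} {rest : List (Int × Int)} {m : List (List Int)}
    (hg : 1 ≤ g) (hJ : JInv v g s m₀ m ((y, x) :: rest)) :
    JInv v g s m₀ (pvMoves.foldl (bfsMove v g y x) (m, rest)).1
      (pvMoves.foldl (bfsMove v g y x) (m, rest)).2 ∧
    (∀ p, GridP v p → pvLab m p = g → pvLab (pvMoves.foldl (bfsMove v g y x) (m, rest)).1 p = g) ∧
    2 * ZC v (pvMoves.foldl (bfsMove v g y x) (m, rest)).1 +
      (pvMoves.foldl (bfsMove v g y x) (m, rest)).2.length <
      2 * ZC v m + ((y, x) :: rest).length := by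
  have hc : GridP v (y, x) := (hJ.2.2.2.1 _ (by simp)).1
  have hcr : ReachP v s (y, x) := (hJ.2.2.2.1 _ (by simp)).2.1
  obtain ⟨hJ1, mono1, cov1, meas1⟩ :=
    bfsMove_inv v g s m₀ (-1, 0) (m, rest) hg hc hcr hJ (by simp <;> omega)
  set st1 := bfsMove v g y x (m, rest) (-1, 0) with hst1
  obtain ⟨hJ2, mono2, cov2, meas2⟩ :=
    bfsMove_inv v g s m₀ (1, 0) st1 hg hc hcr hJ1 (by simp <;> omega)
  set st2 := bfsMove v g y x st1 (1, 0) with hst2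
  obtain ⟨hJ3, mono3, cov3, meas3⟩ :=
    bfsMove_inv v g s m₀ (0, -1) st2 hg hc hcr hJ2 (by simp <;> omega)
  set st3 := bfsMove v g y x st2 (0, -1) with hst3
  obtain ⟨hJ4, mono4, cov4, meas4⟩ :=
    bfsMove_inv v g s m₀ (0, 1) st3 hg hc hcr hJ3 (by simp <;> omega)
  set st4 := bfsMove v g y x st3 (0, 1) with hst4
  have hgoal : pvMoves.foldl (bfsMove v g y x) (m, rest) = st4 := rfl
  rw [hgoal]
  obtain ⟨hwf4, j14, j24, j34, j44⟩ := hJ4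
  have hlabc4 : pvLab st4.1 (y, x) = g := (j34 (y, x) (by simp)).2.2
  have covAll : ∀ r, AdjP v (y, x) r → pvLab st4.1 r = g := by
    intro r hr
    have hgr : GridP v r := hr.2.1
    rcases adj_cases hr with h | h | h | h
    · subst h
      exact mono4 _ hgr (mono3 _ hgr (mono2 _ hgr (cov1 (by simpa using hr))))
    · subst h
      exact mono4 _ hgr (mono3 _ hgr (cov2 (by simpa using hr)))
    · subst h
      exact mono4 _ hgr (cov3 (by simpa using hr))
    · subst h
      exact cov4 (by simpa using hr)
  refine ⟨⟨hwf4, j14, j24, ?_, ?_⟩, ?_, ?_⟩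
  · intro c hcq
    exact j34 c (by simp [hcq])
  · intro p hp hpl hpq r hr
    by_cases hpc : p = (y, x)
    · subst hpc
      exact covAll r hr
    · exact j44 p hp hpl (by simp [hpq, hpc]) r hr
  · intro p hp hpl
    exact mono4 _ hp (mono3 _ hp (mono2 _ hp (mono1 _ hp hpl)))
  · have meas1' : 2 * ZC v st1.1 + st1.2.length ≤ 2 * ZC v m + rest.length := meas1
    have : ((y, x) :: rest).length = rest.length + 1 := by simp
    omega

theorem bfsLoop_spec (v : List (List Int)) (g : Int) (s : Int × Int) (m₀ : List (List Int))
    (hg : 1 ≤ g) :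
    ∀ (F : Nat) (m : List (List Int)) (q : List (Int × Int)),
      JInv v g s m₀ m q → 2 * ZC v m + q.length ≤ F →
      JInv v g s m₀ (bfsLoop v g F m q) [] ∧
      (∀ p, GridP v p → pvLab m p = g → pvLab (bfsLoop v g F m q) p = g) := by
  intro F
  induction F with
  | zero =>
    intro m q hJ hle
    have hq : q = [] := List.length_eq_zero_iff.mp (by omega)
    subst hq
    exact ⟨hJ, fun p _ h => h⟩
  | succ F ih =>
    intro m q hJ hle
    match q with
    | [] => exact ⟨hJ, fun p _ h => h⟩
    | (y, x) :: rest =>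
      obtain ⟨hJ', mono', meas'⟩ := bfsPop v g s m₀ hg hJ
      have hstep : bfsLoop v g (F + 1) m ((y, x) :: rest) =
          bfsLoop v g F (pvMoves.foldl (bfsMove v g y x) (m, rest)).1
            (pvMoves.foldl (bfsMove v g y x) (m, rest)).2 := rfl
      rw [hstep]
      have hle' : 2 * ZC v (pvMoves.foldl (bfsMove v g y x) (m, rest)).1 +
          (pvMoves.foldl (bfsMove v g y x) (m, rest)).2.length ≤ F := by omega
      obtain ⟨hJf, monof⟩ := ih _ _ hJ' hle'
      exact ⟨hJf, fun p hp h => monof p hp (mono' p hp h)⟩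

theorem bfsA_spec (v m : List (List Int)) (g : Int) (s : Int × Int)
    (hwf : WFm v m) (hg : 1 ≤ g) (hs : GridP v s)
    (h0 : ∀ q, ReachP v s q → GridP v q → pvLab m q = 0)
    (hfresh : ∀ p, GridP v p → pvLab m p ≠ g) :
    WFm v (bfsA v m g s.1 s.2) ∧
    (∀ p, GridP v p → ReachP v s p → pvLab (bfsA v m g s.1 s.2) p = g) ∧
    (∀ p, GridP v p → ¬ ReachP v s p → pvLab (bfsA v m g s.1 s.2) p = pvLab m p) := by
  have hs0 : pvLab m s = 0 := h0 s Relation.ReflTransGen.refl hs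
  have hwf1 : WFm v (msetI m s.1 s.2 g) := wfm_mset g hwf (grid_row_lt hwf hs)
  have hpres : ∀ p, GridP v p → p ≠ s → pvLab (msetI m s.1 s.2 g) p = pvLab m p :=
    fun p hp hne => lab_mset_ne g hs hp hne
  have hlabs : pvLab (msetI m s.1 s.2 g) s = g := lab_mset_self g hwf hs
  have hJ : JInv v g s m (msetI m s.1 s.2 g) [(s.1, s.2)] := by
    refine ⟨hwf1, ?_, ?_, ?_, ?_⟩
    · intro p hp hnr
      exact hpres p hp (fun h => hnr (h ▸ Relation.ReflTransGen.refl))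
    · intro p hp hr
      by_cases hne : p = s
      · subst hne; exact Or.inl hlabs
      · rw [hpres p hp hne]; exact Or.inr (h0 p hr hp)
    · intro c hcq
      have : c = s := by simpa using hcq
      subst this; exact ⟨hs, Relation.ReflTransGen.refl, hlabs⟩
    · intro p hp hpl hpq r _
      exfalso
      have hne : p ≠ s := fun h => hpq (by simp [h])
      rw [hpres p hp hne] at hpl
      exact hfresh p hp hpl
  have hmeas : 2 * ZC v (msetI m s.1 s.2 g) + [(s.1, s.2)].length ≤
      2 * v.length * (v.headD []).length + 1 := by
    have h1 : ZC v (msetI m s.1 s.2 g) + 1 = ZC v m := zc_mset g hwf hs hs0 (by omega)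
    have h2 := zc_le v m
    rw [length_cellsOf] at h2
    simp only [List.length_cons, List.length_nil]
    have : 2 * v.length * (v.headD []).length = 2 * (v.length * (v.headD []).length) := by ring
    omega
  obtain ⟨⟨hwfF, j1F, j2F, _, j4F⟩, monoF⟩ :=
    bfsLoop_spec v g s m hg _ _ _ hJ hmeas
  have hreach_g : ∀ p, ReachP v s p →
      pvLab (bfsLoop v g (2 * v.length * (v.headD []).length + 1) (msetI m s.1 s.2 g) [(s.1, s.2)]) p = g := by
    intro p hr
    induction hr with
    | refl => exact monoF s hs hlabs
    | tail hstep hadj ih => exact j4F _ hadj.1 ih (by simp) _ hadj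
  exact ⟨hwfF, fun p _ hr => hreach_g p hr, fun p hp hr => j1F p hp hr⟩


-- ---------- the scan invariant ----------
def InvA (v m : List (List Int)) (g : Int) : Prop :=
  WFm v m ∧ 1 ≤ g ∧
  (∀ p, GridP v p → 0 ≤ pvLab m p ∧ pvLab m p < g) ∧
  (∀ p r, GridP v p → pvLab m p ≠ 0 → AdjP v p r → pvLab m r ≠ 0) ∧
  (∀ p q, GridP v p → GridP v q → pvLab m p ≠ 0 → pvLab m q ≠ 0 →
    (pvLab m p = pvLab m q ↔ ReachP v p q))

theorem marked_closed {v m : List (List Int)}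
    (hC1 : ∀ p r, GridP v p → pvLab m p ≠ 0 → AdjP v p r → pvLab m r ≠ 0)
    {p q : Int × Int} (hp : GridP v p) (hm : pvLab m p ≠ 0) (hr : ReachP v p q) :
    pvLab m q ≠ 0 := by
  induction hr with
  | refl => exact hm
  | tail hstep hadj ih => exact hC1 _ _ (hadj.1) ih hadj

def scanStep (v : List (List Int)) (sg : List (List Int) × Int) (c : Int × Int) :
    List (List Int) × Int :=
  if mgetI sg.1 c.1 c.2 = 0 then (bfsA v sg.1 sg.2 c.1 c.2, sg.2 + 1) else sg

theorem scanGo (v : List (List Int)) :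
    ∀ (todo : List (Int × Int)) (m : List (List Int)) (g : Int),
    (∀ c ∈ todo, GridP v c) → InvA v m g →
    InvA v (todo.foldl (scanStep v) (m, g)).1 (todo.foldl (scanStep v) (m, g)).2 ∧
    (∀ p, GridP v p → pvLab m p ≠ 0 →
      pvLab (todo.foldl (scanStep v) (m, g)).1 p = pvLab m p) ∧
    (∀ c ∈ todo, pvLab (todo.foldl (scanStep v) (m, g)).1 c ≠ 0) := by
  intro todo
  induction todo with
  | nil => exact fun m g _ hI => ⟨hI, fun p _ _ => rfl, by simp⟩
  | cons c todo' ih =>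
    intro m g hgrid hI
    obtain ⟨hwf, hg, hC3, hC1, hC2⟩ := hI
    have hc : GridP v c := hgrid c (by simp)
    rcases Classical.em (pvLab m c = 0) with h0 | h0
    · -- seed a new BFS
      have hstep : scanStep v (m, g) c = (bfsA v m g c.1 c.2, g + 1) := by
        unfold scanStep
        simp only [if_pos (show mgetI m c.1 c.2 = 0 from h0)]
      have hcomp0 : ∀ q, ReachP v c q → GridP v q → pvLab m q = 0 := by
        intro q hr hq
        by_contra hne
        exact (marked_closed hC1 hq hne (reachP_symm v hr)) h0
      have hfresh : ∀ p, GridP v p → pvLab m p ≠ g :=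
        fun p hp => ne_of_lt (hC3 p hp).2
      obtain ⟨hwf', hin, hout⟩ := bfsA_spec v m g c hwf hg hc hcomp0 hfresh
      set m' := bfsA v m g c.1 c.2 with hm'
      have hpres : ∀ p, GridP v p → pvLab m p ≠ 0 → pvLab m' p = pvLab m p := by
        intro p hp hne
        have : ¬ ReachP v c p := fun hr => hne (hcomp0 p hr hp)
        exact hout p hp this
      have hI' : InvA v m' (g + 1) := by
        refine ⟨hwf', by omega, ?_, ?_, ?_⟩
        · intro p hp
          rcases Classical.em (ReachP v c p) with hr | hr
          · rw [hin p hp hr]; omega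
          · rw [hout p hp hr]; have := hC3 p hp; omega
        · intro p r hp hm hadj
          have hrg : GridP v r := hadj.2.1
          rcases Classical.em (ReachP v c p) with hr | hr
          · have : ReachP v c r := Relation.ReflTransGen.tail hr hadj
            rw [hin r hrg this]; omega
          · have hnr : ¬ ReachP v c r := fun hcr =>
              hr (Relation.ReflTransGen.tail hcr (adjP_symm v hadj))
            rw [hout p hp hr] at hm
            rw [hout r hrg hnr]
            exact hC1 p r hp hm hadj
        · intro p q hp hq hmp hmq
          rcases Classical.em (ReachP v c p) with hrp | hrp <;>
            rcases Classical.em (ReachP v c q) with hrq | hrq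
          · rw [hin p hp hrp, hin q hq hrq]
            exact ⟨fun _ => (reachP_symm v hrp).trans hrq, fun _ => rfl⟩
          · rw [hin p hp hrp, hout q hq hrq]
            constructor
            · intro he
              exfalso
              have hmq' : pvLab m q ≠ 0 := by rw [← hout q hq hrq]; exact hmq
              have hlt := (hC3 q hq).2
              omega
            · intro hr
              exact absurd (hrp.trans hr) hrq
          · rw [hout p hp hrp, hin q hq hrq]
            constructor
            · intro he
              exfalso
              have hmp' : pvLab m p ≠ 0 := by rw [← hout p hp hrp]; exact hmp
              have hlt := (hC3 p hp).2
              omega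
            · intro hr
              exact absurd (hrq.trans (reachP_symm v hr)) hrp
          · rw [hout p hp hrp, hout q hq hrq]
            have hmp' : pvLab m p ≠ 0 := by rw [← hout p hp hrp]; exact hmp
            have hmq' : pvLab m q ≠ 0 := by rw [← hout q hq hrq]; exact hmq
            exact hC2 p q hp hq hmp' hmq'
      have hfold : (c :: todo').foldl (scanStep v) (m, g) =
          todo'.foldl (scanStep v) (m', g + 1) := by
        simp only [List.foldl_cons, hstep, hm']
      obtain ⟨hIf, hpresf, hmarkf⟩ := ih m' (g + 1) (fun d hd => hgrid d (by simp [hd])) hI'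
      rw [hfold]
      refine ⟨hIf, ?_, ?_⟩
      · intro p hp hne
        rw [hpresf p hp (by rw [hpres p hp hne]; exact hne), hpres p hp hne]
      · intro d hd
        rcases List.mem_cons.mp hd with hd | hd
        · subst hd
          have hcg : pvLab m' d = g := hin d hc Relation.ReflTransGen.refl
          rw [hpresf d hc (by rw [hcg]; omega), hcg]
          omega
        · exact hmarkf d hd
    · -- already labelled: skip
      have hstep : scanStep v (m, g) c = (m, g) := by
        unfold scanStep
        simp only [if_neg (show ¬ mgetI m c.1 c.2 = 0 from h0)]
      have hfold : (c :: todo').foldl (scanStep v) (m, g) = todo'.foldl (scanStep v) (m, g) := by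
        simp only [List.foldl_cons, hstep]
      obtain ⟨hIf, hpresf, hmarkf⟩ := ih m g (fun d hd => hgrid d (by simp [hd])) ⟨hwf, hg, hC3, hC1, hC2⟩
      rw [hfold]
      refine ⟨hIf, hpresf, ?_⟩
      intro d hd
      rcases List.mem_cons.mp hd with hd | hd
      · subst hd
        rw [hpresf d hc h0]
        exact h0
      · exact hmarkf d hd

-- ---------- the initial matrix and the final labelling ----------
def initA (v : List (List Int)) : List (List Int) :=
  (PySem.List.pyRange 0 (pvRows v) 1).map (fun _ => List.replicate ((v.headD []).length : Int).toNat 0)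

theorem initA_wf (v : List (List Int)) : WFm v (initA v) := by
  constructor
  · simp [initA, PySem.List.length_pyRange_one, pvRows]
  · intro row hr
    simp only [initA, List.mem_map] at hr
    obtain ⟨_, _, hr⟩ := hr
    simp [← hr]

theorem initA_zero (v : List (List Int)) (p : Int × Int) : pvLab (initA v) p = 0 := by
  unfold pvLab mgetI
  have hrow : ∀ z ∈ (initA v).getD p.1.toNat [], z = (0 : Int) := by
    intro z hz
    have hmem : (initA v).getD p.1.toNat [] ∈ initA v ∨ (initA v).getD p.1.toNat [] = [] := by
      by_cases h : p.1.toNat < (initA v).length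
      · exact Or.inl (getD_mem' _ h)
      · exact Or.inr (by rw [List.getD_eq_getElem?_getD, List.getElem?_eq_none (le_of_not_gt h)]; rfl)
    have hrows : ∀ row ∈ initA v, row = List.replicate ((v.headD []).length : Int).toNat 0 := by
      intro row hrow
      simp only [initA, List.mem_map] at hrow
      obtain ⟨_, _, e⟩ := hrow
      exact e.symm
    rcases hmem with h | h
    · rw [hrows _ h] at hz
      exact List.eq_of_mem_replicate hz
    · rw [h] at hz; simp at hz
  by_cases h : p.2.toNat < ((initA v).getD p.1.toNat []).length
  · rw [List.getD_eq_getElem?_getD, List.getElem?_eq_getElem h]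
    exact hrow _ (List.getElem_mem h)
  · rw [List.getD_eq_getElem?_getD, List.getElem?_eq_none (le_of_not_gt h)]; rfl

theorem initA_inv (v : List (List Int)) : InvA v (initA v) 1 := by
  refine ⟨initA_wf v, le_refl _, ?_, ?_, ?_⟩
  · intro p _; rw [initA_zero]; omega
  · intro p r _ hm _; exact absurd (initA_zero v p) hm
  · intro p q _ _ hm _; exact absurd (initA_zero v p) hm

def scanA (v : List (List Int)) : List (List Int) × Int :=
  (cellsOf v).foldl (scanStep v) (initA v, 1)

theorem labA_iff (v : List (List Int)) {p q : Int × Int} (hp : GridP v p) (hq : GridP v q) :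
    pvLab (scanA v).1 p = pvLab (scanA v).1 q ↔ ReachP v p q := by
  obtain ⟨hIf, _, hmark⟩ :=
    scanGo v (cellsOf v) (initA v) 1 (fun c hc => mem_cellsOf.mp hc) (initA_inv v)
  exact hIf.2.2.2.2 p q hp hq (hmark p (mem_cellsOf.mpr hp)) (hmark q (mem_cellsOf.mpr hq))


-- ---------- union-find ----------
def UFInv (n : Int) (par : List Int) : Prop :=
  (par.length : Int) = n ∧
  ∀ k : Nat, k < par.length → 0 ≤ par.getD k 0 ∧ par.getD k 0 ≤ (k : Int)

theorem findRoot_succ (par : List Int) (f : Nat) (i : Int) :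
    findRoot par (f + 1) i =
      if par.getD i.toNat 0 = i then i else findRoot par f (par.getD i.toNat 0) := rfl

theorem findRoot_fuel {n : Int} {par : List Int} (hinv : UFInv n par) :
    ∀ (f : Nat) (i : Int), 0 ≤ i → i < n → i.toNat < f →
      findRoot par f i = findRoot par (i.toNat + 1) i := by
  intro f
  induction f using Nat.strong_induction_on with
  | _ f ih =>
    intro i hi0 hin hif
    match f, hif with
    | f + 1, hif =>
      have hlen : i.toNat < par.length := by
        have := hinv.1; omega
      obtain ⟨hp0, hpk⟩ := hinv.2 i.toNat hlen
      rw [findRoot_succ, findRoot_succ]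
      by_cases hfix : par.getD i.toNat 0 = i
      · rw [if_pos hfix, if_pos hfix]
      · rw [if_neg hfix, if_neg hfix]
        set p := par.getD i.toNat 0 with hp
        have hpi : p < i := by omega
        have hptoNat : p.toNat < i.toNat := by omega
        have e1 : findRoot par f p = findRoot par (p.toNat + 1) p :=
          ih f (by omega) p hp0 (by omega) (by omega)
        have e2 : findRoot par i.toNat p = findRoot par (p.toNat + 1) p :=
          ih i.toNat (by omega) p hp0 (by omega) (by omega)
        rw [e1, e2]

theorem ufFind_eq {n : Int} {par : List Int} (hinv : UFInv n par) {i : Int}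
    (hi0 : 0 ≤ i) (hin : i < n) :
    ufFind par i = if par.getD i.toNat 0 = i then i else ufFind par (par.getD i.toNat 0) := by
  show findRoot par (i.toNat + 1) i = _
  rw [findRoot_succ]
  by_cases hfix : par.getD i.toNat 0 = i
  · rw [if_pos hfix, if_pos hfix]
  · rw [if_neg hfix, if_neg hfix]
    have hlen : i.toNat < par.length := by have := hinv.1; omega
    obtain ⟨hp0, hpk⟩ := hinv.2 i.toNat hlen
    exact findRoot_fuel hinv i.toNat (par.getD i.toNat 0) hp0 (by omega) (by omega)

theorem ufFind_props {n : Int} {par : List Int} (hinv : UFInv n par) :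
    ∀ (N : Nat) (i : Int), 0 ≤ i → i < n → i.toNat < N →
      0 ≤ ufFind par i ∧ ufFind par i ≤ i ∧
      par.getD (ufFind par i).toNat 0 = ufFind par i := by
  intro N
  induction N using Nat.strong_induction_on with
  | _ N ih =>
    intro i hi0 hin hiN
    match N, hiN with
    | N + 1, hiN =>
      have hlen : i.toNat < par.length := by have := hinv.1; omega
      obtain ⟨hp0, hpk⟩ := hinv.2 i.toNat hlen
      rw [ufFind_eq hinv hi0 hin]
      by_cases hfix : par.getD i.toNat 0 = i
      · rw [if_pos hfix]
        exact ⟨hi0, le_refl _, hfix⟩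
      · rw [if_neg hfix]
        set p := par.getD i.toNat 0 with hp
        have hpi : p < i := by omega
        obtain ⟨h1, h2, h3⟩ := ih N (by omega) p hp0 (by omega) (by omega)
        exact ⟨h1, by omega, h3⟩

theorem ufFind_root {n : Int} {par : List Int} (hinv : UFInv n par) {i : Int}
    (hi0 : 0 ≤ i) (hin : i < n) :
    0 ≤ ufFind par i ∧ ufFind par i ≤ i ∧
    par.getD (ufFind par i).toNat 0 = ufFind par i :=
  ufFind_props hinv (i.toNat + 1) i hi0 hin (by omega)

theorem ufFind_set {n : Int} {par : List Int} (hinv : UFInv n par) {r r' : Int}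
    (hr0 : 0 ≤ r) (hrn : r < n) (hrfix : par.getD r.toNat 0 = r)
    (hr'0 : 0 ≤ r') (hr'fix : par.getD r'.toNat 0 = r') (hlt : r' < r) :
    UFInv n (par.set r.toNat r') ∧
    ∀ i, 0 ≤ i → i < n →
      ufFind (par.set r.toNat r') i = if ufFind par i = r then r' else ufFind par i := by
  have hlen : r.toNat < par.length := by have := hinv.1; omega
  have hgetset : ∀ k : Nat, (par.set r.toNat r').getD k 0 =
      if k = r.toNat then r' else par.getD k 0 := by
    intro k
    by_cases hk : k = r.toNat
    · subst hk; rw [if_pos rfl]; exact getD_set_self' _ _ _ _ hlen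
    · rw [if_neg hk]; exact getD_set_ne' _ _ _ (fun h => hk h.symm)
  have hinv' : UFInv n (par.set r.toNat r') := by
    constructor
    · rw [List.length_set]; exact hinv.1
    · intro k hk
      rw [List.length_set] at hk
      rw [hgetset k]
      by_cases hkr : k = r.toNat
      · rw [if_pos hkr]; subst hkr; omega
      · rw [if_neg hkr]; exact hinv.2 k hk
  refine ⟨hinv', ?_⟩
  have main : ∀ (N : Nat) (i : Int), 0 ≤ i → i < n → i.toNat < N →
      ufFind (par.set r.toNat r') i = if ufFind par i = r then r' else ufFind par i := by
    intro N
    induction N using Nat.strong_induction_on with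
    | _ N ih =>
      intro i hi0 hin hiN
      match N, hiN with
      | N + 1, hiN =>
        have hleni : i.toNat < par.length := by have := hinv.1; omega
        obtain ⟨hp0, hpk⟩ := hinv.2 i.toNat hleni
        rw [ufFind_eq hinv' hi0 hin, ufFind_eq hinv hi0 hin, hgetset i.toNat]
        by_cases hir : i.toNat = r.toNat
        · have hireq : i = r := by omega
          subst hireq
          rw [if_pos rfl]
          have hne : r' ≠ i := by omega
          rw [if_neg hne, hrfix, if_pos rfl]
          have : ufFind (par.set i.toNat r') r' = if ufFind par r' = i then r' else ufFind par r' := by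
            rcases Nat.lt_or_ge r'.toNat N with hN | hN
            · exact ih N (by omega) r' hr'0 (by omega) hN
            · omega
          rw [this]
          have hfr' : ufFind par r' = r' := by
            rw [ufFind_eq hinv hr'0 (by omega), hr'fix, if_pos rfl]
          rw [hfr']
          rw [if_neg (by omega : r' ≠ i)]
          rw [if_pos rfl]
        · rw [if_neg hir]
          by_cases hfix : par.getD i.toNat 0 = i
          · rw [if_pos hfix, if_pos hfix]
            have hine : i ≠ r := by omega
            rw [if_neg hine]
          · rw [if_neg hfix, if_neg hfix]
            exact ih N (by omega) (par.getD i.toNat 0) hp0 (by omega) (by omega)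
  intro i hi0 hin
  exact main (i.toNat + 1) i hi0 hin (by omega)

theorem ufUnion_spec {n : Int} {par : List Int} (hinv : UFInv n par) {a b : Int}
    (ha0 : 0 ≤ a) (han : a < n) (hb0 : 0 ≤ b) (hbn : b < n) :
    UFInv n (ufUnion par a b) ∧
    ∀ i j, 0 ≤ i → i < n → 0 ≤ j → j < n →
      (ufFind (ufUnion par a b) i = ufFind (ufUnion par a b) j ↔
        (ufFind par i = ufFind par j ∨
         (ufFind par i = ufFind par a ∧ ufFind par b = ufFind par j) ∨
         (ufFind par i = ufFind par b ∧ ufFind par a = ufFind par j))) := by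
  obtain ⟨hra0, hral, hrafix⟩ := ufFind_root hinv ha0 han
  obtain ⟨hrb0, hrbl, hrbfix⟩ := ufFind_root hinv hb0 hbn
  set ra := ufFind par a with hra
  set rb := ufFind par b with hrb
  unfold ufUnion
  rw [← hra, ← hrb]
  by_cases heq : ra = rb
  · rw [if_pos heq]
    refine ⟨hinv, ?_⟩
    intro i j _ _ _ _
    constructor
    · exact fun h => Or.inl h
    · rintro (h | ⟨h1, h2⟩ | ⟨h1, h2⟩) <;> omega
  · rw [if_neg heq]
    by_cases hlt : ra < rb
    · rw [if_pos hlt]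
      obtain ⟨hinv', hchar⟩ := ufFind_set hinv hrb0 (by omega) hrbfix hra0 hrafix hlt
      refine ⟨hinv', ?_⟩
      intro i j hi0 hin hj0 hjn
      rw [hchar i hi0 hin, hchar j hj0 hjn]
      split_ifs <;> omega
    · rw [if_neg hlt]
      obtain ⟨hinv', hchar⟩ := ufFind_set hinv hra0 (by omega) hrafix hrb0 hrbfix (by omega)
      refine ⟨hinv', ?_⟩
      intro i j hi0 hin hj0 hjn
      rw [hchar i hi0 hin, hchar j hj0 hjn]
      split_ifs <;> omega


-- ---------- equivalence generated by a pair list ----------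
def relPairs (P : List (Int × Int)) (i j : Int) : Prop := (i, j) ∈ P

def EqvP (P : List (Int × Int)) (i j : Int) : Prop := Relation.EqvGen (relPairs P) i j

theorem eqvP_nil {i j : Int} : EqvP [] i j ↔ i = j := by
  constructor
  · intro h
    induction h with
    | rel _ _ h => exact absurd h (by simp [relPairs])
    | refl => rfl
    | symm _ _ _ ih => omega
    | trans _ _ _ _ _ ih1 ih2 => omega
  · rintro rfl; exact Relation.EqvGen.refl i

theorem eqvP_snoc {P : List (Int × Int)} {a b : Int} {i j : Int} :
    EqvP (P ++ [(a, b)]) i j ↔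
      EqvP P i j ∨ (EqvP P i a ∧ EqvP P b j) ∨ (EqvP P i b ∧ EqvP P a j) := by
  constructor
  · intro h
    induction h with
    | rel x y h =>
      rcases List.mem_append.mp h with h | h
      · exact Or.inl (Relation.EqvGen.rel _ _ h)
      · have : (x, y) = (a, b) := by simpa using h
        have hx : x = a := (Prod.mk.injEq _ _ _ _).mp this |>.1
        have hy : y = b := (Prod.mk.injEq _ _ _ _).mp this |>.2
        subst hx; subst hy
        exact Or.inr (Or.inl ⟨Relation.EqvGen.refl _, Relation.EqvGen.refl _⟩)
    | refl x => exact Or.inl (Relation.EqvGen.refl x)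
    | symm x y _ ih =>
      rcases ih with h | ⟨h1, h2⟩ | ⟨h1, h2⟩
      · exact Or.inl (Relation.EqvGen.symm _ _ h)
      · exact Or.inr (Or.inr ⟨Relation.EqvGen.symm _ _ h2, Relation.EqvGen.symm _ _ h1⟩)
      · exact Or.inr (Or.inl ⟨Relation.EqvGen.symm _ _ h2, Relation.EqvGen.symm _ _ h1⟩)
    | trans x y z _ _ ih1 ih2 =>
      rcases ih1 with h1 | ⟨hxa, hby⟩ | ⟨hxb, hay⟩ <;>
        rcases ih2 with h2 | ⟨hya, hbz⟩ | ⟨hyb, haz⟩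
      · exact Or.inl (Relation.EqvGen.trans _ _ _ h1 h2)
      · exact Or.inr (Or.inl ⟨Relation.EqvGen.trans _ _ _ h1 hya, hbz⟩)
      · exact Or.inr (Or.inr ⟨Relation.EqvGen.trans _ _ _ h1 hyb, haz⟩)
      · exact Or.inr (Or.inl ⟨hxa, Relation.EqvGen.trans _ _ _ hby h2⟩)
      · exact Or.inl (Relation.EqvGen.trans _ _ _ hxa
          (Relation.EqvGen.trans _ _ _ (Relation.EqvGen.symm _ _ (Relation.EqvGen.trans _ _ _ hby hya)) hbz))
      · exact Or.inl (Relation.EqvGen.trans _ _ _ hxa haz)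
      · exact Or.inr (Or.inr ⟨hxb, Relation.EqvGen.trans _ _ _ hay h2⟩)
      · exact Or.inl (Relation.EqvGen.trans _ _ _ hxb hbz)
      · exact Or.inl (Relation.EqvGen.trans _ _ _ hxb
          (Relation.EqvGen.trans _ _ _ (Relation.EqvGen.symm _ _ (Relation.EqvGen.trans _ _ _ hay hyb)) haz))
  · have hmono : ∀ {x y : Int}, EqvP P x y → EqvP (P ++ [(a, b)]) x y :=
      fun h => Relation.EqvGen.mono (fun x y hx => List.mem_append.mpr (Or.inl hx)) h
    have hab : EqvP (P ++ [(a, b)]) a b :=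
      Relation.EqvGen.rel _ _ (List.mem_append.mpr (Or.inr (by simp)))
    rintro (h | ⟨h1, h2⟩ | ⟨h1, h2⟩)
    · exact hmono h
    · exact Relation.EqvGen.trans _ _ _ (hmono h1)
        (Relation.EqvGen.trans _ _ _ hab (hmono h2))
    · exact Relation.EqvGen.trans _ _ _ (hmono h1)
        (Relation.EqvGen.trans _ _ _ (Relation.EqvGen.symm _ _ hab) (hmono h2))

-- ---------- the fold over a pair list ----------
def foldUnions (P : List (Int × Int)) (par : List Int) : List Int :=
  P.foldl (fun p pr => ufUnion p pr.1 pr.2) par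

theorem uf_fold (n : Int) (hn : 0 ≤ n) :
    ∀ P : List (Int × Int), (∀ pr ∈ P, 0 ≤ pr.1 ∧ pr.1 < n ∧ 0 ≤ pr.2 ∧ pr.2 < n) →
    UFInv n (foldUnions P (PySem.List.pyRange 0 n 1)) ∧
    ∀ i j, 0 ≤ i → i < n → 0 ≤ j → j < n →
      (ufFind (foldUnions P (PySem.List.pyRange 0 n 1)) i =
       ufFind (foldUnions P (PySem.List.pyRange 0 n 1)) j ↔ EqvP P i j) := by
  have hlen0 : ((PySem.List.pyRange 0 n 1).length : Int) = n := by
    rw [PySem.List.length_pyRange_one]; omega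
  have hget0 : ∀ k : Nat, k < (PySem.List.pyRange 0 n 1).length →
      (PySem.List.pyRange 0 n 1).getD k 0 = (k : Int) := by
    intro k hk
    rw [List.getD_eq_getElem?_getD, List.getElem?_eq_getElem hk]
    simp [PySem.List.getElem_pyRange_one]
  have hinv0 : UFInv n (PySem.List.pyRange 0 n 1) := by
    refine ⟨hlen0, ?_⟩
    intro k hk
    rw [hget0 k hk]
    omega
  have hfind0 : ∀ i : Int, 0 ≤ i → i < n → ufFind (PySem.List.pyRange 0 n 1) i = i := by
    intro i hi0 hin
    rw [ufFind_eq hinv0 hi0 hin]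
    have hk : i.toNat < (PySem.List.pyRange 0 n 1).length := by omega
    rw [hget0 i.toNat hk]
    rw [if_pos (by omega)]
  intro P
  induction P using List.reverseRecOn with
  | nil =>
    intro _
    refine ⟨hinv0, ?_⟩
    intro i j hi0 hin hj0 hjn
    show ufFind (PySem.List.pyRange 0 n 1) i = ufFind (PySem.List.pyRange 0 n 1) j ↔ EqvP [] i j
    rw [hfind0 i hi0 hin, hfind0 j hj0 hjn, eqvP_nil]
  | append_singleton P pr ihP =>
    intro hmem
    obtain ⟨a, b⟩ := pr
    obtain ⟨hinvP, hiffP⟩ := ihP (fun q hq => hmem q (by simp [hq]))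
    have hab := hmem (a, b) (by simp)
    have hfold : foldUnions (P ++ [(a, b)]) (PySem.List.pyRange 0 n 1) =
        ufUnion (foldUnions P (PySem.List.pyRange 0 n 1)) a b := by
      unfold foldUnions
      rw [List.foldl_concat]
    rw [hfold]
    obtain ⟨hinv', hiff'⟩ := ufUnion_spec hinvP hab.1 hab.2.1 hab.2.2.1 hab.2.2.2
    refine ⟨hinv', ?_⟩
    intro i j hi0 hin hj0 hjn
    rw [hiff' i j hi0 hin hj0 hjn, eqvP_snoc,
      hiffP i j hi0 hin hj0 hjn,
      hiffP i a hi0 hin hab.1 hab.2.1,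
      hiffP b j hab.2.2.1 hab.2.2.2 hj0 hjn,
      hiffP i b hi0 hin hab.2.2.1 hab.2.2.2,
      hiffP a j hab.1 hab.2.1 hj0 hjn]


-- ---------- flattened indices ----------
def encC (v : List (List Int)) (p : Int × Int) : Int := p.1 * pvCols v + p.2

theorem cols_nonneg (v : List (List Int)) : 0 ≤ pvCols v := Int.natCast_nonneg _

theorem enc_range {v : List (List Int)} {p : Int × Int} (hp : GridP v p) :
    0 ≤ encC v p ∧ encC v p < pvRows v * pvCols v := by
  obtain ⟨h1, h2, h3, h4⟩ := hp
  have hC := cols_nonneg v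
  have hm : 0 ≤ p.1 * pvCols v := mul_nonneg h1 hC
  have step : (p.1 + 1) * pvCols v ≤ pvRows v * pvCols v :=
    mul_le_mul_of_nonneg_right (by omega) hC
  rw [add_one_mul] at step
  unfold encC
  constructor <;> linarith

theorem enc_inj {v : List (List Int)} {p q : Int × Int} (hp : GridP v p) (hq : GridP v q)
    (h : encC v p = encC v q) : p = q := by
  obtain ⟨h1, h2, h3, h4⟩ := hp
  obtain ⟨g1, g2, g3, g4⟩ := hq
  have hC := cols_nonneg v
  unfold encC at h
  have h11 : p.1 = q.1 := by
    rcases lt_trichotomy p.1 q.1 with hlt | heq | hgt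
    · exfalso
      have step : (p.1 + 1) * pvCols v ≤ q.1 * pvCols v :=
        mul_le_mul_of_nonneg_right (by omega) hC
      rw [add_one_mul] at step
      linarith
    · exact heq
    · exfalso
      have step : (q.1 + 1) * pvCols v ≤ p.1 * pvCols v :=
        mul_le_mul_of_nonneg_right (by omega) hC
      rw [add_one_mul] at step
      linarith
  have h22 : p.2 = q.2 := by
    rw [h11] at h
    omega
  exact Prod.ext h11 h22

-- ---------- the union pair list of B's scan ----------
def pairsOf (v : List (List Int)) (c : Int × Int) : List (Int × Int) :=
  (if c.2 + 1 < pvCols v ∧ mgetI v c.1 c.2 = mgetI v c.1 (c.2 + 1) then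
    [(encC v c, encC v c + 1)] else []) ++
  (if c.1 + 1 < pvRows v ∧ mgetI v c.1 c.2 = mgetI v (c.1 + 1) c.2 then
    [(encC v c, encC v c + pvCols v)] else [])

def unionPairs (v : List (List Int)) : List (Int × Int) := (cellsOf v).flatMap (pairsOf v)

theorem adj_right {v : List (List Int)} {c : Int × Int} (hc : GridP v c)
    (h1 : c.2 + 1 < pvCols v) (h2 : mgetI v c.1 c.2 = mgetI v c.1 (c.2 + 1)) :
    AdjP v c (c.1, c.2 + 1) := by
  obtain ⟨a1, a2, a3, a4⟩ := hc
  exact ⟨⟨a1, a2, a3, a4⟩, ⟨a1, a2, by omega, h1⟩, h2, Or.inl ⟨rfl, Or.inl rfl⟩⟩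

theorem adj_down {v : List (List Int)} {c : Int × Int} (hc : GridP v c)
    (h1 : c.1 + 1 < pvRows v) (h2 : mgetI v c.1 c.2 = mgetI v (c.1 + 1) c.2) :
    AdjP v c (c.1 + 1, c.2) := by
  obtain ⟨a1, a2, a3, a4⟩ := hc
  exact ⟨⟨a1, a2, a3, a4⟩, ⟨by omega, h1, a3, a4⟩, h2, Or.inr ⟨rfl, Or.inl rfl⟩⟩

theorem enc_right (v : List (List Int)) (c : Int × Int) :
    encC v (c.1, c.2 + 1) = encC v c + 1 := by unfold encC; ring

theorem enc_down (v : List (List Int)) (c : Int × Int) :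
    encC v (c.1 + 1, c.2) = encC v c + pvCols v := by unfold encC; ring

theorem mem_unionPairs {v : List (List Int)} {a b : Int} :
    relPairs (unionPairs v) a b ↔
    ∃ c, GridP v c ∧
      ((c.2 + 1 < pvCols v ∧ mgetI v c.1 c.2 = mgetI v c.1 (c.2 + 1) ∧
        a = encC v c ∧ b = encC v c + 1) ∨
       (c.1 + 1 < pvRows v ∧ mgetI v c.1 c.2 = mgetI v (c.1 + 1) c.2 ∧
        a = encC v c ∧ b = encC v c + pvCols v)) := by
  unfold relPairs unionPairs
  rw [List.mem_flatMap]
  constructor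
  · rintro ⟨c, hc, hm⟩
    refine ⟨c, mem_cellsOf.mp hc, ?_⟩
    unfold pairsOf at hm
    rcases List.mem_append.mp hm with hm | hm
    · split_ifs at hm with h
      · have : (a, b) = (encC v c, encC v c + 1) := by simpa using hm
        exact Or.inl ⟨h.1, h.2, congrArg Prod.fst this, congrArg Prod.snd this⟩
      · simp at hm
    · split_ifs at hm with h
      · have : (a, b) = (encC v c, encC v c + pvCols v) := by simpa using hm
        exact Or.inr ⟨h.1, h.2, congrArg Prod.fst this, congrArg Prod.snd this⟩
      · simp at hm
  · rintro ⟨c, hgrid, hcase⟩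
    refine ⟨c, mem_cellsOf.mpr hgrid, ?_⟩
    unfold pairsOf
    rcases hcase with ⟨h1, h2, ha, hb⟩ | ⟨h1, h2, ha, hb⟩
    · apply List.mem_append.mpr (Or.inl _)
      rw [if_pos ⟨h1, h2⟩, ha, hb]
      simp
    · apply List.mem_append.mpr (Or.inr _)
      rw [if_pos ⟨h1, h2⟩, ha, hb]
      simp

theorem adj_eqvP {v : List (List Int)} {b c : Int × Int} (hadj : AdjP v b c) :
    EqvP (unionPairs v) (encC v b) (encC v c) := by
  obtain ⟨hb, hc, hval, hdir⟩ := hadj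
  rcases hdir with ⟨h1, h2 | h2⟩ | ⟨h1, h2 | h2⟩
  · -- c is right of b
    have hceq : c = (b.1, b.2 + 1) := Prod.ext h1.symm h2
    apply Relation.EqvGen.rel
    rw [mem_unionPairs]
    refine ⟨b, hb, Or.inl ⟨?_, ?_, rfl, ?_⟩⟩
    · rw [hceq] at hc; exact hc.2.2.2
    · show mgetI v b.1 b.2 = mgetI v b.1 (b.2 + 1)
      rw [show mgetI v b.1 (b.2 + 1) = pvLab v c by rw [hceq]; rfl]
      exact hval
    · rw [← enc_right v b, ← hceq]
  · -- c is left of b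
    have hbeq : b = (c.1, c.2 + 1) := Prod.ext h1 h2
    apply Relation.EqvGen.symm
    apply Relation.EqvGen.rel
    rw [mem_unionPairs]
    refine ⟨c, hc, Or.inl ⟨?_, ?_, rfl, ?_⟩⟩
    · rw [hbeq] at hb; exact hb.2.2.2
    · show mgetI v c.1 c.2 = mgetI v c.1 (c.2 + 1)
      rw [show mgetI v c.1 (c.2 + 1) = pvLab v b by rw [hbeq]; rfl]
      exact hval.symm
    · rw [← enc_right v c, ← hbeq]
  · -- c is below b
    have hceq : c = (b.1 + 1, b.2) := Prod.ext h2 h1.symm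
    apply Relation.EqvGen.rel
    rw [mem_unionPairs]
    refine ⟨b, hb, Or.inr ⟨?_, ?_, rfl, ?_⟩⟩
    · rw [hceq] at hc; exact hc.2.1
    · show mgetI v b.1 b.2 = mgetI v (b.1 + 1) b.2
      rw [show mgetI v (b.1 + 1) b.2 = pvLab v c by rw [hceq]; rfl]
      exact hval
    · rw [← enc_down v b, ← hceq]
  · -- c is above b
    have hbeq : b = (c.1 + 1, c.2) := Prod.ext h2 h1
    apply Relation.EqvGen.symm
    apply Relation.EqvGen.rel
    rw [mem_unionPairs]
    refine ⟨c, hc, Or.inr ⟨?_, ?_, rfl, ?_⟩⟩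
    · rw [hbeq] at hb; exact hb.2.1
    · show mgetI v c.1 c.2 = mgetI v (c.1 + 1) c.2
      rw [show mgetI v (c.1 + 1) c.2 = pvLab v b by rw [hbeq]; rfl]
      exact hval.symm
    · rw [← enc_down v c, ← hbeq]

theorem reach_to_eqvP {v : List (List Int)} {p q : Int × Int} (h : ReachP v p q) :
    EqvP (unionPairs v) (encC v p) (encC v q) := by
  induction h with
  | refl => exact Relation.EqvGen.refl _
  | tail hstep hadj ih => exact Relation.EqvGen.trans _ _ _ ih (adj_eqvP hadj)

theorem eqvP_to_reach {v : List (List Int)} :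
    ∀ {x y : Int}, EqvP (unionPairs v) x y →
      x = y ∨ ∃ p q, GridP v p ∧ GridP v q ∧ x = encC v p ∧ y = encC v q ∧ ReachP v p q := by
  intro x y h
  induction h with
  | rel x y h =>
    right
    obtain ⟨c, hgrid, hcase⟩ := mem_unionPairs.mp h
    rcases hcase with ⟨h1, h2, ha, hb⟩ | ⟨h1, h2, ha, hb⟩
    · refine ⟨c, (c.1, c.2 + 1), hgrid, (adj_right hgrid h1 h2).2.1, ha, ?_,
        Relation.ReflTransGen.single (adj_right hgrid h1 h2)⟩
      rw [enc_right v c]; exact hb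
    · refine ⟨c, (c.1 + 1, c.2), hgrid, (adj_down hgrid h1 h2).2.1, ha, ?_,
        Relation.ReflTransGen.single (adj_down hgrid h1 h2)⟩
      rw [enc_down v c]; exact hb
  | refl x => exact Or.inl rfl
  | symm x y _ ih =>
    rcases ih with h | ⟨p, q, hp, hq, hx, hy, hr⟩
    · exact Or.inl h.symm
    · exact Or.inr ⟨q, p, hq, hp, hy, hx, reachP_symm v hr⟩
  | trans x y z _ _ ih1 ih2 =>
    rcases ih1 with h1 | ⟨p, q, hp, hq, hx, hy, hr⟩
    · rcases ih2 with h2 | ⟨p', q', hp', hq', hy', hz', hr'⟩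
      · exact Or.inl (h1.trans h2)
      · exact Or.inr ⟨p', q', hp', hq', h1.trans hy', hz', hr'⟩
    · rcases ih2 with h2 | ⟨p', q', hp', hq', hy', hz', hr'⟩
      · exact Or.inr ⟨p, q, hp, hq, hx, h2 ▸ hy, hr⟩
      · have : q = p' := enc_inj hq hp' (by rw [← hy, hy'])
        exact Or.inr ⟨p, q', hp, hq', hx, hz', hr.trans (this ▸ hr')⟩

-- ---------- B's final root function ----------
def parF (v : List (List Int)) : List Int :=
  foldUnions (unionPairs v) (PySem.List.pyRange 0 (pvRows v * pvCols v) 1)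

theorem unionPairs_range {v : List (List Int)} :
    ∀ pr ∈ unionPairs v, 0 ≤ pr.1 ∧ pr.1 < pvRows v * pvCols v ∧
      0 ≤ pr.2 ∧ pr.2 < pvRows v * pvCols v := by
  rintro ⟨a, b⟩ hm
  obtain ⟨c, hgrid, hcase⟩ := mem_unionPairs.mp hm
  rcases hcase with ⟨h1, h2, ha, hb⟩ | ⟨h1, h2, ha, hb⟩
  · have hc := enc_range hgrid
    have hr : GridP v (c.1, c.2 + 1) := (adj_right hgrid h1 h2).2.1
    have hc2 := enc_range hr
    rw [enc_right v c] at hc2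
    simp only [ha, hb]
    exact ⟨hc.1, hc.2, by omega, by omega⟩
  · have hc := enc_range hgrid
    have hr : GridP v (c.1 + 1, c.2) := (adj_down hgrid h1 h2).2.1
    have hc2 := enc_range hr
    rw [enc_down v c] at hc2
    simp only [ha, hb]
    exact ⟨hc.1, hc.2, by omega, by omega⟩

theorem rootB_iff {v : List (List Int)} {p q : Int × Int} (hp : GridP v p) (hq : GridP v q) :
    ufFind (parF v) (encC v p) = ufFind (parF v) (encC v q) ↔ ReachP v p q := by
  have hn : 0 ≤ pvRows v * pvCols v := mul_nonneg (Int.natCast_nonneg _) (Int.natCast_nonneg _)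
  obtain ⟨_, hiff⟩ := uf_fold (pvRows v * pvCols v) hn (unionPairs v) unionPairs_range
  have hep := enc_range hp
  have heq := enc_range hq
  rw [show parF v = foldUnions (unionPairs v) (PySem.List.pyRange 0 (pvRows v * pvCols v) 1) from rfl]
  rw [hiff _ _ hep.1 hep.2 heq.1 heq.2]
  constructor
  · intro h
    rcases eqvP_to_reach h with h | ⟨p', q', hp', hq', hx, hy, hr⟩
    · have : p = q := enc_inj hp hq h
      exact this ▸ Relation.ReflTransGen.refl
    · have e1 : p = p' := enc_inj hp hp' hx
      have e2 : q = q' := enc_inj hq hq' hy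
      rw [e1, e2]; exact hr
  · exact reach_to_eqvP


-- ---------- accounting: dict of label sets (A) ----------
theorem getD_fold_modify (key lab : Int × Int → Int) :
    ∀ (l : List (Int × Int)) (d : PySem.Dict Int (PySem.Set Int)) (t : Int),
    ((l.foldl (fun d p => PySem.Dict.modify d (key p) [] (fun s => PySem.Set.add s (lab p))) d).getD t []) =
    PySem.Set.update (d.getD t []) ((l.filter (fun p => key p == t)).map lab) := by
  intro l
  induction l with
  | nil => intro d t; rfl
  | cons p l ih =>
    intro d t
    rw [List.foldl_cons, List.filter_cons]
    by_cases hk : key p = t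
    · rw [if_pos (by simpa using hk)]
      rw [ih]
      subst hk
      rw [PySem.Dict.getD_modify_self]
      rfl
    · rw [if_neg (by simpa using hk)]
      rw [ih]
      rw [PySem.Dict.getD_modify_of_ne _ _ _ (fun h => hk h.symm)]

-- ---------- accounting: three root sets (B) ----------
theorem getD_fold_set3 (key rootf : Int × Int → Int) :
    ∀ (l : List (Int × Int)) (rs : List (PySem.Set Int)), rs.length = 3 →
    (∀ p ∈ l, key p = 0 ∨ key p = 1 ∨ key p = 2) →
    (l.foldl (fun rs p =>
        rs.set (key p).toNat (PySem.Set.add (rs.getD (key p).toNat []) (rootf p))) rs).length = 3 ∧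
    ∀ t : Int, (t = 0 ∨ t = 1 ∨ t = 2) →
      (l.foldl (fun rs p =>
        rs.set (key p).toNat (PySem.Set.add (rs.getD (key p).toNat []) (rootf p))) rs).getD t.toNat [] =
      PySem.Set.update (rs.getD t.toNat []) ((l.filter (fun p => key p == t)).map rootf) := by
  intro l
  induction l with
  | nil => exact fun rs hlen _ => ⟨hlen, fun t _ => rfl⟩
  | cons p l ih =>
    intro rs hlen hkeys
    have hkp := hkeys p (by simp)
    have hset : (rs.set (key p).toNat (PySem.Set.add (rs.getD (key p).toNat []) (rootf p))).length = 3 := by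
      rw [List.length_set]; exact hlen
    obtain ⟨hlenf, hgetf⟩ := ih _ hset (fun q hq => hkeys q (by simp [hq]))
    rw [List.foldl_cons]
    refine ⟨hlenf, ?_⟩
    intro t ht
    rw [hgetf t ht, List.filter_cons]
    by_cases hk : key p = t
    · rw [if_pos (by simpa using hk)]
      subst hk
      rw [getD_set_self' _ _ _ _ (by rw [hlen]; omega)]
      rfl
    · rw [if_neg (by simpa using hk)]
      rw [getD_set_ne' _ _ _ (by omega)]

-- ---------- Pre_ gives values in {0,1,2} on the grid ----------
theorem pre_val {v : List (List Int)} (hpre : Pre_solution v) {p : Int × Int} (hp : GridP v p) :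
    mgetI v p.1 p.2 = 0 ∨ mgetI v p.1 p.2 = 1 ∨ mgetI v p.1 p.2 = 2 := by
  obtain ⟨hne, hrows⟩ := hpre
  obtain ⟨h1, h2, h3, h4⟩ := hp
  have hlt : p.1.toNat < v.length := by unfold pvRows at h2; omega
  have hmem : v.getD p.1.toNat [] ∈ v := getD_mem' _ hlt
  obtain ⟨_, hvals⟩ := hrows _ hmem
  have : p.2.toNat < (v.headD []).length := by unfold pvCols at h4; omega
  exact hvals p.2.toNat this

-- ---------- closed forms for the two ports ----------
def res0D : PySem.Dict Int (PySem.Set Int) :=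
  (PySem.List.pyRange 0 3 1).foldl (fun d i => d.insert i []) PySem.Dict.empty

theorem solution_closed (v : List (List Int)) :
    solution v = (PySem.List.pyRange 0 3 1).map (fun t => PySem.Set.len
      (((cellsOf v).foldl (fun d p =>
          PySem.Dict.modify d (mgetI v p.1 p.2) [] (fun s => PySem.Set.add s (pvLab (scanA v).1 p))) res0D).getD t [])) := by
  have e1 : (PySem.List.pyRange 0 (pvRows v) 1).foldl (fun sg i =>
              (PySem.List.pyRange 0 (pvCols v) 1).foldl (fun (sg : List (List Int) × Int) j =>
                if mgetI sg.1 i j = 0 then (bfsA v sg.1 sg.2 i j, sg.2 + 1) else sg) sg) (initA v, 1)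
      = scanA v := foldl_cells v (scanStep v) (initA v, 1)
  have e2 : (PySem.List.pyRange 0 (pvRows v) 1).foldl (fun d i =>
              (PySem.List.pyRange 0 (pvCols v) 1).foldl (fun (d : PySem.Dict Int (PySem.Set Int)) j =>
                PySem.Dict.modify d (mgetI v i j) [] (fun s => PySem.Set.add s (mgetI (scanA v).1 i j))) d) res0D
      = (cellsOf v).foldl (fun d p =>
          PySem.Dict.modify d (mgetI v p.1 p.2) [] (fun s => PySem.Set.add s (pvLab (scanA v).1 p))) res0D :=
    foldl_cells v (fun d p =>
      PySem.Dict.modify d (mgetI v p.1 p.2) [] (fun s => PySem.Set.add s (pvLab (scanA v).1 p))) res0D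
  show (PySem.List.pyRange 0 3 1).map (fun t => PySem.Set.len
      (((PySem.List.pyRange 0 (pvRows v) 1).foldl (fun d i =>
        (PySem.List.pyRange 0 (pvCols v) 1).foldl (fun (d : PySem.Dict Int (PySem.Set Int)) j =>
          PySem.Dict.modify d (mgetI v i j) [] (fun s => PySem.Set.add s
            (mgetI ((PySem.List.pyRange 0 (pvRows v) 1).foldl (fun sg i =>
              (PySem.List.pyRange 0 (pvCols v) 1).foldl (fun (sg : List (List Int) × Int) j =>
                if mgetI sg.1 i j = 0 then (bfsA v sg.1 sg.2 i j, sg.2 + 1) else sg) sg) (initA v, 1)).1 i j))) d) res0D).getD t [])) = _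
  rw [e1, e2]

def rootsB (v : List (List Int)) : List (PySem.Set Int) :=
  (cellsOf v).foldl (fun rs p =>
    rs.set (mgetI v p.1 p.2).toNat
      (PySem.Set.add (rs.getD (mgetI v p.1 p.2).toNat []) (ufFind (parF v) (encC v p)))) [[], [], []]

def rootsB' (v : List (List Int)) : List (PySem.Set Int) :=
  (cellsOf v).foldl (fun rs p =>
    rs.set (pyIdx3 (mgetI v p.1 p.2))
      (PySem.Set.add (rs.getD (pyIdx3 (mgetI v p.1 p.2)) []) (ufFind (parF v) (encC v p)))) [[], [], []]

theorem rootsB'_eq_rootsB {v : List (List Int)} (hpre : Pre_solution v) : rootsB' v = rootsB v := by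
  apply PySem.List.foldl_congr_mem
  intro acc p hp
  have hv := pre_val hpre (mem_cellsOf.mp hp)
  have hidx : pyIdx3 (mgetI v p.1 p.2) = (mgetI v p.1 p.2).toNat := by
    unfold pyIdx3
    rw [if_neg (by omega)]
  rw [hidx]

theorem parF_closed (v : List (List Int)) :
    (PySem.List.pyRange 0 (pvRows v) 1).foldl (fun p i =>
      (PySem.List.pyRange 0 (pvCols v) 1).foldl (fun (p : List Int) j =>
        let p1 := if j + 1 < pvCols v ∧ mgetI v i j = mgetI v i (j + 1) then
            ufUnion p (i * pvCols v + j) (i * pvCols v + j + 1) else p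
        if i + 1 < pvRows v ∧ mgetI v i j = mgetI v (i + 1) j then
          ufUnion p1 (i * pvCols v + j) ((i + 1) * pvCols v + j) else p1) p)
      (PySem.List.pyRange 0 (pvRows v * pvCols v) 1) = parF v := by
  have cell_unions : ∀ (p : List Int) (c : Int × Int),
      (let p1 := if c.2 + 1 < pvCols v ∧ mgetI v c.1 c.2 = mgetI v c.1 (c.2 + 1) then
          ufUnion p (c.1 * pvCols v + c.2) (c.1 * pvCols v + c.2 + 1) else p
       if c.1 + 1 < pvRows v ∧ mgetI v c.1 c.2 = mgetI v (c.1 + 1) c.2 then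
         ufUnion p1 (c.1 * pvCols v + c.2) ((c.1 + 1) * pvCols v + c.2) else p1) =
      foldUnions (pairsOf v c) p := by
    intro p c
    have henc : encC v c = c.1 * pvCols v + c.2 := rfl
    have henc2 : (c.1 + 1) * pvCols v + c.2 = encC v c + pvCols v := by unfold encC; ring
    unfold pairsOf foldUnions
    split_ifs with h1 h2 h2 <;>
      simp only [List.foldl_append, List.foldl_cons, List.foldl_nil, henc, henc2]
  have e : (PySem.List.pyRange 0 (pvRows v) 1).foldl (fun p i =>
      (PySem.List.pyRange 0 (pvCols v) 1).foldl (fun (p : List Int) j =>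
        let p1 := if j + 1 < pvCols v ∧ mgetI v i j = mgetI v i (j + 1) then
            ufUnion p (i * pvCols v + j) (i * pvCols v + j + 1) else p
        if i + 1 < pvRows v ∧ mgetI v i j = mgetI v (i + 1) j then
          ufUnion p1 (i * pvCols v + j) ((i + 1) * pvCols v + j) else p1) p)
      (PySem.List.pyRange 0 (pvRows v * pvCols v) 1)
      = (cellsOf v).foldl (fun p c => foldUnions (pairsOf v c) p)
          (PySem.List.pyRange 0 (pvRows v * pvCols v) 1) := by
    rw [← foldl_cells v (fun p c => foldUnions (pairsOf v c) p)
      (PySem.List.pyRange 0 (pvRows v * pvCols v) 1)]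
    apply PySem.List.foldl_congr_mem
    intro acc i _
    apply PySem.List.foldl_congr_mem
    intro acc2 j _
    exact cell_unions acc2 (i, j)
  rw [e]
  unfold parF foldUnions unionPairs
  rw [List.foldl_flatMap]

theorem solution_alt_closed (v : List (List Int)) :
    solution_alt v = (rootsB' v).map (fun s => PySem.Set.len s) := by
  have e3 : (PySem.List.pyRange 0 (pvRows v) 1).foldl (fun rs i =>
      (PySem.List.pyRange 0 (pvCols v) 1).foldl (fun (rs : List (PySem.Set Int)) j =>
        rs.set (pyIdx3 (mgetI v i j))
          (PySem.Set.add (rs.getD (pyIdx3 (mgetI v i j)) []) (ufFind (parF v) (i * pvCols v + j)))) rs)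
      ([[], [], []] : List (PySem.Set Int))
      = rootsB' v :=
    foldl_cells v (fun rs p =>
      rs.set (pyIdx3 (mgetI v p.1 p.2))
        (PySem.Set.add (rs.getD (pyIdx3 (mgetI v p.1 p.2)) []) (ufFind (parF v) (encC v p)))) [[], [], []]
  show ((PySem.List.pyRange 0 (pvRows v) 1).foldl (fun rs i =>
      (PySem.List.pyRange 0 (pvCols v) 1).foldl (fun (rs : List (PySem.Set Int)) j =>
        rs.set (pyIdx3 (mgetI v i j))
          (PySem.Set.add (rs.getD (pyIdx3 (mgetI v i j)) [])
            (ufFind ((PySem.List.pyRange 0 (pvRows v) 1).foldl (fun p i =>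
                (PySem.List.pyRange 0 (pvCols v) 1).foldl (fun (p : List Int) j =>
                  let p1 := if j + 1 < pvCols v ∧ mgetI v i j = mgetI v i (j + 1) then
                      ufUnion p (i * pvCols v + j) (i * pvCols v + j + 1) else p
                  if i + 1 < pvRows v ∧ mgetI v i j = mgetI v (i + 1) j then
                    ufUnion p1 (i * pvCols v + j) ((i + 1) * pvCols v + j) else p1) p)
                (PySem.List.pyRange 0 (pvRows v * pvCols v) 1)) (i * pvCols v + j)))) rs)
      ([[], [], []] : List (PySem.Set Int))).map (fun s => PySem.Set.len s) = _
  rw [parF_closed v, e3]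

theorem map_of_length3 {α β : Type} (l : List α) (f : α → β) (d : α) (h : l.length = 3) :
    l.map f = [f (l.getD 0 d), f (l.getD 1 d), f (l.getD 2 d)] := by
  match l, h with
  | [a, b, c], _ => rfl

theorem update_nil_eq_ofList (xs : List Int) :
    PySem.Set.update ([] : PySem.Set Int) xs = PySem.Set.ofList xs :=
  (PySem.Set.ofList_eq_foldl xs).symm

theorem res0D_getD (t : Int) (ht : t = 0 ∨ t = 1 ∨ t = 2) : res0D.getD t [] = [] := by
  rcases ht with h | h | h <;> subst h <;> decide

-- ===== VERDICT (by name: the statement is the Claim_ definition above) =====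
theorem solution_spec : Claim_equal_solution := by
  unfold Claim_equal_solution
  intro v _ hpre
  unfold Spec_solution
  rw [solution_closed v, solution_alt_closed v, rootsB'_eq_rootsB hpre]
  obtain ⟨hlen3, hget3⟩ := getD_fold_set3 (fun p => mgetI v p.1 p.2)
    (fun p => ufFind (parF v) (encC v p)) (cellsOf v) [[], [], []] rfl
    (fun p hp => pre_val hpre (mem_cellsOf.mp hp))
  have hlenB : (rootsB v).length = 3 := hlen3
  rw [map_of_length3 (rootsB v) _ [] hlenB]
  have hrange3 : PySem.List.pyRange 0 3 1 = [0, 1, 2] := by decide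
  rw [hrange3]
  have key : ∀ t : Int, (t = 0 ∨ t = 1 ∨ t = 2) →
      PySem.Set.len (((cellsOf v).foldl (fun d p =>
        PySem.Dict.modify d (mgetI v p.1 p.2) [] (fun s => PySem.Set.add s (pvLab (scanA v).1 p))) res0D).getD t []) =
      PySem.Set.len ((rootsB v).getD t.toNat []) := by
    intro t ht
    have hA := getD_fold_modify (fun p => mgetI v p.1 p.2) (fun p => pvLab (scanA v).1 p)
      (cellsOf v) res0D t
    have hB := hget3 t ht
    rw [hA, res0D_getD t ht, update_nil_eq_ofList]
    have h0B : ([[], [], []] : List (PySem.Set Int)).getD t.toNat [] = [] := by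
      rcases ht with h | h | h <;> subst h <;> rfl
    rw [show (rootsB v).getD t.toNat [] = PySem.Set.update (([[], [], []] : List (PySem.Set Int)).getD t.toNat [])
        (((cellsOf v).filter (fun p => mgetI v p.1 p.2 == t)).map (fun p => ufFind (parF v) (encC v p))) from hB]
    rw [h0B, update_nil_eq_ofList]
    have hiff : ∀ a ∈ (cellsOf v).filter (fun p => mgetI v p.1 p.2 == t),
        ∀ b ∈ (cellsOf v).filter (fun p => mgetI v p.1 p.2 == t),
        (pvLab (scanA v).1 a = pvLab (scanA v).1 b ↔
         ufFind (parF v) (encC v a) = ufFind (parF v) (encC v b)) := by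
      intro a ha b hb
      have hga : GridP v a := mem_cellsOf.mp (List.mem_of_mem_filter ha)
      have hgb : GridP v b := mem_cellsOf.mp (List.mem_of_mem_filter hb)
      rw [labA_iff v hga hgb, rootB_iff hga hgb]
    have := set_update_length ((cellsOf v).filter (fun p => mgetI v p.1 p.2 == t))
      (fun p => pvLab (scanA v).1 p) (fun p => ufFind (parF v) (encC v p)) hiff
    show ((PySem.Set.ofList _).length : Int) = ((PySem.Set.ofList _).length : Int)
    rw [this]
  simp only [List.map_cons, List.map_nil]
  rw [key 0 (by omega), key 1 (by omega), key 2 (by omega)]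
  rfl
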